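-- pv_equiv track=rewrite | github.com/opena11y/fae-auditor | faeAuditor/auditData/populate_websites_from_csv.py | titleFromSlug
-- ===== SOURCE A (Python) =====
-- def titleFromSlug(s):
--
--   parts = s.split('_')
--
--   title = ""
--   for p in parts:
--     if title == "":
--       title = p.title()
--     else:
--       title = title + " " + p.title()
--
--   return title
-- ===== SOURCE B (Python) =====
-- def titleFromSlug(s):
--   # one-pass string-method pipeline; lstrip('_') reproduces A's collapsing of
--   # leading underscores (A's loop adds no separator while the title is still empty)
--   return s.lstrip('_').replace('_', ' ').title()
-- ===== Notes on version B (the rewrite author's own statement) =====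
-- stated objective: idiomatic
-- what changed: Replaced the split-into-parts list and the accumulate-with-separator loop by a single string-method pipeline lstrip('_') + replace('_',' ') + title(), relying on title()'s word-boundary rule at spaces.
import Mathlib
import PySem

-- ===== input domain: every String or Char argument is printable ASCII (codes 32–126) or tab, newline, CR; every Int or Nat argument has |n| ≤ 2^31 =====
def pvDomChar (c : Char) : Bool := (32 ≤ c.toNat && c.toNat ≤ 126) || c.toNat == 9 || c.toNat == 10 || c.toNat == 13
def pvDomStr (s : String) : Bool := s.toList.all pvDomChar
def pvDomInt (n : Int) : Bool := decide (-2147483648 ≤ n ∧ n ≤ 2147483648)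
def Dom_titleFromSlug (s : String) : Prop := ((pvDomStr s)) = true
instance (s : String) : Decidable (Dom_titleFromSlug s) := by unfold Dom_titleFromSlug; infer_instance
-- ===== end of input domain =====

-- B replaces A's split-into-parts accumulation loop by a single lstrip/replace/title
-- string-method pipeline (idiomatic, same cost); return values proved equal on Dom.

-- shared helper: port of Python's str.title() builtin (exact on the ASCII domain:
-- a letter is uppercased when the previous character is not a letter, lowercased otherwise)
def pyTitleChars : List Char → Bool → List Char
  | [], _ => []
  | c :: rest, prev =>
    (if PySem.Chars.isalpha c then
       (if prev then PySem.Chars.lowerChar c else PySem.Chars.upperChar c)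
     else c) :: pyTitleChars rest (PySem.Chars.isalpha c)

def pyTitle (s : String) : String := String.ofList (pyTitleChars s.toList false)

-- ===== PORT A =====
def titleFromSlug (s : String) : String :=
  -- parts = s.split('_')  (PySem.Chars.splitOn is the sep ≠ "" split; wrapped back to String)
  let parts : List String := (PySem.Chars.splitOn s.toList "_".toList).map String.ofList
  parts.foldl (fun title p => if title == "" then pyTitle p else title ++ " " ++ pyTitle p) ""

-- ===== PORT B =====
def titleFromSlug_alt (s : String) : String :=
  -- s.lstrip('_') ported by hand as dropWhile (exact: strips the leading run of '_');
  -- then .replace('_', ' ') via PySem, then .title() via pyTitle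
  pyTitle (PySem.Str.replace (String.ofList (s.toList.dropWhile (· == '_'))) "_" " ")

-- ===== PRECONDITION & SPEC =====
def Spec_titleFromSlug (s : String) (out : String) : Prop := out = titleFromSlug_alt s
instance (s : String) (out : String) : Decidable (Spec_titleFromSlug s out) := by unfold Spec_titleFromSlug; infer_instance

-- ===== CLAIM (what is proved, stated in full; the proofs are below) =====
def Claim_equal_titleFromSlug : Prop := ∀ (s : String), Dom_titleFromSlug s → Spec_titleFromSlug s (titleFromSlug s)

-- ===== LEMMAS AND PROOFS =====

-- specification-side recursions (used only by the proofs)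
def mySplit : List Char → List (List Char)
  | [] => [[]]
  | c :: rest => if c = '_' then [] :: mySplit rest else (mySplit rest).modifyHead (c :: ·)

def myRep : List Char → List Char
  | [] => []
  | c :: rest => (if c = '_' then ' ' else c) :: myRep rest

def trc : List Char → Bool → List Char
  | [], _ => []
  | c :: rest, b =>
    if c = '_' then ' ' :: trc rest false
    else (if PySem.Chars.isalpha c then
            (if b then PySem.Chars.lowerChar c else PySem.Chars.upperChar c)
          else c) :: trc rest (PySem.Chars.isalpha c)

def foldA : List (List Char) → List Char → List Char
  | [], t => t
  | p :: ps, t => foldA ps (if t = [] then pyTitleChars p false else t ++ ' ' :: pyTitleChars p false)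

theorem modifyHead_fun_id {α : Type} (l : List α) : l.modifyHead (fun x => x) = l := by
  cases l <;> simp

theorem splitOn_go_spec : ∀ (l : List Char) (fuel : Nat)
    (cur : List Char) (acc : List (List Char)), l.length < fuel →
    PySem.Chars.splitOn.go ['_'] fuel l cur acc
      = acc.reverse ++ (mySplit l).modifyHead (cur.reverse ++ ·) := by
  intro l
  induction l with
  | nil =>
    intro fuel cur acc h
    match fuel, h with
    | fuel+1, _ => simp [PySem.Chars.splitOn.go, mySplit]
  | cons c rest ih =>
    intro fuel cur acc h
    match fuel, h with
    | fuel+1, h =>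
      simp only [PySem.Chars.splitOn.go]
      by_cases hc : c = '_'
      · subst hc
        rw [if_pos (by simp [List.isPrefixOf]), show List.drop ['_'].length ('_' :: rest) = rest from rfl,
          ih fuel [] _ (by simpa using Nat.lt_of_succ_lt_succ h)]
        simp [mySplit, modifyHead_fun_id]
      · rw [if_neg (by simp [List.isPrefixOf, Ne.symm hc])]
        rw [ih fuel (c :: cur) acc (by simpa using Nat.lt_of_succ_lt_succ h)]
        simp only [mySplit, if_neg hc, List.modifyHead_modifyHead]
        congr 2
        funext x
        simp

theorem splitOn_eq_mySplit (cs : List Char) : PySem.Chars.splitOn cs ['_'] = mySplit cs := by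
  rw [PySem.Chars.splitOn, splitOn_go_spec cs (cs.length+1) [] [] (by omega)]
  simp [modifyHead_fun_id]

theorem replace_go_spec : ∀ (l : List Char) (fuel : Nat) (acc : List Char), l.length ≤ fuel →
    PySem.Chars.replace.go ['_'] [' '] fuel l acc = acc.reverse ++ myRep l := by
  intro l
  induction l with
  | nil =>
    intro fuel acc h
    match fuel with
    | 0 => simp [PySem.Chars.replace.go, myRep]
    | fuel+1 => simp [PySem.Chars.replace.go, myRep]
  | cons c rest ih =>
    intro fuel acc h
    match fuel, h with
    | fuel+1, h =>
      simp only [PySem.Chars.replace.go]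
      by_cases hc : c = '_'
      · subst hc
        rw [if_pos (by simp [List.isPrefixOf]), show List.drop ['_'].length ('_' :: rest) = rest from rfl,
          ih fuel _ (by simpa using Nat.le_of_succ_le_succ h)]
        simp [myRep]
      · rw [if_neg (by simp [List.isPrefixOf, Ne.symm hc]),
          ih fuel _ (by simpa using Nat.le_of_succ_le_succ h)]
        simp [myRep, hc]

theorem replace_eq_myRep (cs : List Char) : PySem.Chars.replace cs ['_'] [' '] = myRep cs := by
  rw [PySem.Chars.replace]
  rw [if_neg (by simp)]
  rw [replace_go_spec cs cs.length [] (by omega)]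
  simp

theorem title_myRep (cs : List Char) : ∀ (b : Bool), pyTitleChars (myRep cs) b = trc cs b := by
  induction cs with
  | nil => intro b; rfl
  | cons c rest ih =>
    intro b
    by_cases hc : c = '_'
    · subst hc
      simp [myRep, trc, pyTitleChars, ih, show PySem.Chars.isalpha ' ' = false from rfl]
    · simp [myRep, trc, pyTitleChars, ih, hc]

theorem trc_no_us (p : List Char) : ∀ (b : Bool), '_' ∉ p → trc p b = pyTitleChars p b := by
  induction p with
  | nil => intro b _; rfl
  | cons c rest ih =>
    intro b h
    simp only [List.mem_cons, not_or] at h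
    simp [trc, pyTitleChars, Ne.symm h.1, ih _ h.2]

theorem trc_append_us (p : List Char) (rest : List Char) : ∀ (b : Bool), '_' ∉ p →
    trc (p ++ '_' :: rest) b = pyTitleChars p b ++ ' ' :: trc rest false := by
  induction p with
  | nil => intro b _; simp [trc, pyTitleChars]
  | cons c q ih =>
    intro b h
    simp only [List.mem_cons, not_or] at h
    simp [trc, pyTitleChars, Ne.symm h.1, ih _ h.2]

theorem pyTitleChars_ne_nil (p : List Char) (h : p ≠ []) (b : Bool) : pyTitleChars p b ≠ [] := by
  cases p with
  | nil => exact absurd rfl h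
  | cons c rest => simp [pyTitleChars]

theorem foldA_K (cs : List Char) : ∀ (p t : List Char), '_' ∉ p → t ≠ [] →
    foldA ((mySplit cs).modifyHead (p ++ ·)) t = t ++ ' ' :: trc (p ++ cs) false := by
  induction cs with
  | nil =>
    intro p t hp ht
    simp [mySplit, foldA, ht, trc_no_us p false hp]
  | cons c rest ih =>
    intro p t hp ht
    by_cases hc : c = '_'
    · subst hc
      simp only [mySplit, reduceIte, List.modifyHead_cons, List.append_nil]
      show foldA (p :: mySplit rest) t = _
      simp only [foldA, if_neg ht]
      have h2 : (mySplit rest).modifyHead (([] : List Char) ++ ·) = mySplit rest := by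
        cases h : mySplit rest <;> simp
      rw [show mySplit rest = (mySplit rest).modifyHead (([] : List Char) ++ ·) from h2.symm]
      rw [ih [] _ (by simp) (by simp)]
      rw [trc_append_us p rest false hp]
      simp
    · simp only [mySplit, if_neg hc, List.modifyHead_modifyHead]
      have : ((fun x => p ++ x) ∘ (fun x => c :: x)) = (fun x => (p ++ [c]) ++ x) := by
        funext x; simp
      rw [this, ih (p ++ [c]) t (by simp [hp, Ne.symm hc]) ht]
      simp

theorem foldA_K0 (cs : List Char) : ∀ (p : List Char), p ≠ [] → '_' ∉ p →
    foldA ((mySplit cs).modifyHead (p ++ ·)) [] = trc (p ++ cs) false := by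
  induction cs with
  | nil =>
    intro p hp hus
    simp [mySplit, foldA, trc_no_us p false hus]
  | cons c rest ih =>
    intro p hp hus
    by_cases hc : c = '_'
    · subst hc
      simp only [mySplit, reduceIte, List.modifyHead_cons, List.append_nil]
      show foldA (p :: mySplit rest) [] = _
      simp only [foldA, reduceIte]
      have h2 : (mySplit rest).modifyHead (([] : List Char) ++ ·) = mySplit rest := by
        cases h : mySplit rest <;> simp
      rw [show mySplit rest = (mySplit rest).modifyHead (([] : List Char) ++ ·) from h2.symm]
      rw [foldA_K rest [] _ (by simp) (pyTitleChars_ne_nil p hp false)]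
      rw [trc_append_us p rest false hus]
      simp
    · simp only [mySplit, if_neg hc, List.modifyHead_modifyHead]
      have : ((fun x => p ++ x) ∘ (fun x => c :: x)) = (fun x => (p ++ [c]) ++ x) := by
        funext x; simp
      rw [this, ih (p ++ [c]) (by simp) (by simp [hus, Ne.symm hc])]
      simp

theorem foldA_main (cs : List Char) :
    foldA (mySplit cs) [] = trc (cs.dropWhile (· == '_')) false := by
  induction cs with
  | nil => rfl
  | cons c rest ih =>
    by_cases hc : c = '_'
    · subst hc
      simp only [mySplit, reduceIte, foldA, List.dropWhile_cons]
      simpa [pyTitleChars] using ih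
    · simp only [mySplit, if_neg hc, List.dropWhile_cons]
      have h2 : (mySplit rest).modifyHead (fun x => c :: x) = (mySplit rest).modifyHead ((([c] : List Char)) ++ ·) := by
        cases h : mySplit rest <;> simp
      rw [h2, foldA_K0 rest [c] (by simp) (by simp [Ne.symm hc])]
      simp [hc]

theorem fold_bridge (ps : List String) : ∀ (t : String),
    ps.foldl (fun title p => if title == "" then pyTitle p else title ++ " " ++ pyTitle p) t
      = String.ofList (foldA (ps.map String.toList) t.toList) := by
  induction ps with
  | nil => intro t; simp [foldA, String.ofList_toList]
  | cons p ps ih =>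
    intro t
    simp only [List.foldl_cons, List.map_cons, foldA, ih]
    congr 1
    by_cases ht : t = ""
    · subst ht
      simp [pyTitle, String.toList_ofList]
    · rw [if_neg (by simpa using ht), if_neg (by intro hnil; exact ht (String.toList_inj.mp (by simpa using hnil)))]
      simp [pyTitle, String.toList_ofList, String.toList_append]

-- ===== VERDICT (by name: the statement is the Claim_ definition above) =====
theorem titleFromSlug_spec : Claim_equal_titleFromSlug := by
  intro s _
  unfold Spec_titleFromSlug titleFromSlug titleFromSlug_alt
  rw [fold_bridge]
  simp only [List.map_map, Function.comp_def, String.toList_ofList]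
  rw [show ("_" : String).toList = ['_'] from rfl, splitOn_eq_mySplit, List.map_id'' (fun _ => rfl)]
  rw [show ("" : String).toList = [] from rfl, foldA_main]
  simp only [pyTitle, PySem.Str.replace, String.toList_ofList,
    show ("_" : String).toList = ['_'] from rfl, show (" " : String).toList = [' '] from rfl]
  rw [replace_eq_myRep, title_myRep]
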